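-- pv_equiv track=rewrite | github.com/juliahubo21/Account-Management-Repo | scripts/weekly_summary.py | build_owner_chunks
-- ===== SOURCE A (Python) =====
-- from collections import defaultdict
--
-- AFFINITY_URL  = "https://motivepartners.affinity.co"
--
-- def slk_escape(text):
--     return (text or "").replace("&", "&amp;").replace("<", "&lt;").replace(">", "&gt;")
--
-- def slk_link(url, label):
--     safe = (label or "").replace("|", "/")
--     return f"<{url}|{slk_escape(safe)}>"
--
-- def co_url(co_id):
--     return f"{AFFINITY_URL}/companies/{co_id}"
--
-- def co_link_plain(name, co_id):
--     return slk_link(co_url(co_id), name)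
--
-- def build_owner_chunks(no_interaction):
--     """Each chunk = one owner line."""
--     owner_map = defaultdict(list)
--     for co_name, co_id, owner_name in no_interaction:
--         owner_map[owner_name].append((co_name, co_id))
--     chunks = []
--     for owner in sorted(owner_map):
--         cos   = sorted(owner_map[owner], key=lambda x: x[0])
--         links = " · ".join(co_link_plain(n, cid) for n, cid in cos)
--         chunks.append(f"_{owner}:_ {links}")
--     return chunks
-- ===== SOURCE B (Python) =====
-- AFFINITY_URL = "https://motivepartners.affinity.co"
--
-- def slk_escape(text):
--     return (text or "").replace("&", "&amp;").replace("<", "&lt;").replace(">", "&gt;")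
--
-- def slk_link(url, label):
--     safe = (label or "").replace("|", "/")
--     return f"<{url}|{slk_escape(safe)}>"
--
-- def co_url(co_id):
--     return f"{AFFINITY_URL}/companies/{co_id}"
--
-- def co_link_plain(name, co_id):
--     return slk_link(co_url(co_id), name)
--
-- def build_owner_chunks(no_interaction):
--     """Each chunk = one owner line: one global stable sort by (owner, name), then one linear grouping pass."""
--     rows = sorted(no_interaction, key=lambda t: (t[2], t[0]))
--     chunks = []
--     i, n = 0, len(rows)
--     while i < n:
--         owner = rows[i][2]
--         links = []
--         while i < n and rows[i][2] == owner:
--             links.append(co_link_plain(rows[i][0], rows[i][1]))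
--             i += 1
--         chunks.append(f"_{owner}:_ " + " · ".join(links))
--     return chunks
-- ===== Notes on version B (the rewrite author's own statement) =====
-- stated objective: alternative
-- what changed: Replaces A's defaultdict grouping followed by sorting the key list and each per-owner bucket separately with one global stable sort of the whole list by the tuple key (owner, company name) and a single linear grouping pass over consecutive equal-owner runs.
import Mathlib
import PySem

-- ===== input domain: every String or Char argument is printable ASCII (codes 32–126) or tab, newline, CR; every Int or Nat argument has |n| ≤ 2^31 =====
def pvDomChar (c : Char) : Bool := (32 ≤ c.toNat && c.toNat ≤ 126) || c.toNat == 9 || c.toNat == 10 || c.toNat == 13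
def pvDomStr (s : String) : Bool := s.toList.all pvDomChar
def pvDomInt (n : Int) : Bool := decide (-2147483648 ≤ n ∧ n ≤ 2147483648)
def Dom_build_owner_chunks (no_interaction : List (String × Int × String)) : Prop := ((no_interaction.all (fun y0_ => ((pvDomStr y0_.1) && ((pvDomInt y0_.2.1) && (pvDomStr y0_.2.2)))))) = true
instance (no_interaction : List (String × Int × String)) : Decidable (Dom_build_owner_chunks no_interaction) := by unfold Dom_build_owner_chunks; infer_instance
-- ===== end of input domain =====

-- B replaces A's dict-of-buckets + per-owner sorts by ONE global stable sort on (owner, name)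
-- followed by a single linear grouping pass (objective: alternative decomposition, same result).

-- ===== PORT A =====
def AFFINITY_URL : String := "https://motivepartners.affinity.co"

def slk_escape (text : String) : String :=
  PySem.Str.replace (PySem.Str.replace (PySem.Str.replace
    (if text == "" then "" else text) "&" "&amp;") "<" "&lt;") ">" "&gt;"

def slk_link (url : String) (label : String) : String :=
  let safe := PySem.Str.replace (if label == "" then "" else label) "|" "/"
  "<" ++ url ++ "|" ++ slk_escape safe ++ ">"

def co_url (co_id : Int) : String :=
  AFFINITY_URL ++ "/companies/" ++ PySem.Int.toStr co_id

def co_link_plain (name : String) (co_id : Int) : String :=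
  slk_link (co_url co_id) name

def build_owner_chunks (no_interaction : List (String × Int × String)) : List String :=
  let owner_map : PySem.Dict String (List (String × Int)) :=
    no_interaction.foldl
      (fun d t => d.modify t.2.2 [] (fun l => l ++ [(t.1, t.2.1)])) PySem.Dict.empty
  (PySem.List.sorted owner_map.keys (fun o => o)).foldl
    (fun chunks owner =>
      let cos := PySem.List.sorted (owner_map.getD owner []) (fun x => x.1)
      let links := PySem.Str.join " · " (cos.map (fun p => co_link_plain p.1 p.2))
      chunks ++ ["_" ++ owner ++ ":_ " ++ links]) []

-- ===== PORT B =====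
-- the outer while loop of Source B: each step consumes one maximal run of equal owners
def bocGo (rows : List (String × Int × String)) : List String :=
  match rows with
  | [] => []
  | r :: rs =>
    ("_" ++ r.2.2 ++ ":_ " ++ PySem.Str.join " · "
        ((r :: rs.takeWhile (fun t => t.2.2 == r.2.2)).map (fun t => co_link_plain t.1 t.2.1)))
      :: bocGo (rs.dropWhile (fun t => t.2.2 == r.2.2))
termination_by rows.length
decreasing_by simp only [List.length_cons]; exact Nat.lt_succ_of_le (List.length_dropWhile_le _ _)

def build_owner_chunks_alt (no_interaction : List (String × Int × String)) : List String :=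
  bocGo (PySem.List.sorted2 no_interaction (fun t => t.2.2) (fun t => t.1))

-- ===== PRECONDITION & SPEC =====
def Spec_build_owner_chunks (no_interaction : List (String × Int × String)) (out : List String) : Prop := out = build_owner_chunks_alt no_interaction
instance (no_interaction : List (String × Int × String)) (out : List String) : Decidable (Spec_build_owner_chunks no_interaction out) := by unfold Spec_build_owner_chunks; infer_instance

-- ===== CLAIM (what is proved, stated in full; the proofs are below) =====
def Claim_equal_build_owner_chunks : Prop := ∀ (no_interaction : List (String × Int × String)), Dom_build_owner_chunks no_interaction → Spec_build_owner_chunks no_interaction (build_owner_chunks no_interaction)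

-- ===== LEMMAS AND PROOFS =====

-- the comparison sorted2 uses on rows, and the order it realises
def bLex (t u : String × Int × String) : Bool :=
  decide (t.2.2 < u.2.2) || (!decide (u.2.2 < t.2.2) && decide (t.1 < u.1))

def bName (t u : String × Int × String) : Bool := decide (t.1 < u.1)

def lexLe (t u : String × Int × String) : Prop :=
  t.2.2 < u.2.2 ∨ (t.2.2 = u.2.2 ∧ t.1 ≤ u.1)

lemma sorted2_eq (xs : List (String × Int × String)) :
    PySem.List.sorted2 xs (fun t => t.2.2) (fun t => t.1)
      = xs.foldl (fun acc x => PySem.List.insertBy bLex x acc) [] := rfl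

lemma sorted_name_eq (l : List (String × Int × String)) :
    PySem.List.sorted l (fun t => t.1)
      = l.foldl (fun acc x => PySem.List.insertBy bName x acc) [] := rfl

lemma insertBy_nil' {α : Type} (b : α → α → Bool) (x : α) :
    PySem.List.insertBy b x [] = [x] := rfl

lemma insertBy_cons' {α : Type} (b : α → α → Bool) (x y : α) (ys : List α) :
    PySem.List.insertBy b x (y :: ys)
      = if b x y then x :: y :: ys else y :: PySem.List.insertBy b x ys := rfl

lemma bLex_true {t u : String × Int × String} (h : bLex t u = true) : lexLe t u := by
  simp only [bLex, Bool.or_eq_true, Bool.and_eq_true, Bool.not_eq_eq_eq_not, Bool.not_true,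
    decide_eq_true_eq, decide_eq_false_iff_not] at h
  rcases h with h | ⟨h1, h2⟩
  · exact Or.inl h
  · rcases lt_trichotomy t.2.2 u.2.2 with hlt | heq | hgt
    · exact Or.inl hlt
    · exact Or.inr ⟨heq, le_of_lt h2⟩
    · exact absurd hgt h1

lemma bLex_false {t u : String × Int × String} (h : bLex t u = false) : lexLe u t := by
  simp only [bLex, Bool.or_eq_false_iff, Bool.and_eq_false_iff, Bool.not_eq_false',
    decide_eq_true_eq, decide_eq_false_iff_not] at h
  obtain ⟨h1, h2⟩ := h
  rcases h2 with h2 | h2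
  · exact Or.inl h2
  · rcases lt_trichotomy u.2.2 t.2.2 with hlt | heq | hgt
    · exact Or.inl hlt
    · exact Or.inr ⟨heq, not_lt.mp h2⟩
    · exact absurd hgt h1

lemma lexLe_trans {t u v : String × Int × String} (h1 : lexLe t u) (h2 : lexLe u v) : lexLe t v := by
  rcases h1 with h1 | ⟨h1a, h1b⟩ <;> rcases h2 with h2 | ⟨h2a, h2b⟩
  · exact Or.inl (lt_trans h1 h2)
  · exact Or.inl (h2a ▸ h1)
  · exact Or.inl (h1a ▸ h2)
  · exact Or.inr ⟨h1a.trans h2a, le_trans h1b h2b⟩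

lemma lexLe_owner_le {t u : String × Int × String} (h : lexLe t u) : t.2.2 ≤ u.2.2 := by
  rcases h with h | ⟨h, _⟩
  · exact le_of_lt h
  · exact le_of_eq h

lemma mem_insertBy' {α : Type} {b : α → α → Bool} {x z : α} :
    ∀ {l : List α}, z ∈ PySem.List.insertBy b x l → z = x ∨ z ∈ l := by
  intro l
  induction l with
  | nil => intro h; rw [insertBy_nil'] at h; exact Or.inl (List.mem_singleton.mp h)
  | cons y ys ih =>
    intro h
    rw [insertBy_cons'] at h
    by_cases hb : b x y = true
    · rw [if_pos hb] at h
      rcases List.mem_cons.mp h with rfl | h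
      · exact Or.inl rfl
      · exact Or.inr h
    · rw [if_neg hb] at h
      rcases List.mem_cons.mp h with rfl | h
      · exact Or.inr (List.mem_cons_self ..)
      · rcases ih h with rfl | h
        · exact Or.inl rfl
        · exact Or.inr (List.mem_cons_of_mem _ h)

lemma pairwise_insertBy {x : String × Int × String} {l : List (String × Int × String)}
    (h : l.Pairwise lexLe) : (PySem.List.insertBy bLex x l).Pairwise lexLe := by
  induction l with
  | nil => simp [insertBy_nil']
  | cons y ys ih =>
    rw [insertBy_cons']
    by_cases hb : bLex x y = true
    · rw [if_pos hb]
      refine List.Pairwise.cons ?_ h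
      intro z hz
      rcases List.mem_cons.mp hz with rfl | hz
      · exact bLex_true hb
      · exact lexLe_trans (bLex_true hb) (List.rel_of_pairwise_cons h hz)
    · rw [if_neg hb]
      have hb' : bLex x y = false := by simpa using hb
      refine List.Pairwise.cons ?_ (ih h.of_cons)
      intro z hz
      rcases mem_insertBy' hz with rfl | hz
      · exact bLex_false hb'
      · exact List.rel_of_pairwise_cons h hz

lemma pairwise_foldl_insertBy :
    ∀ (xs acc : List (String × Int × String)), acc.Pairwise lexLe →
      (xs.foldl (fun a x => PySem.List.insertBy bLex x a) acc).Pairwise lexLe := by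
  intro xs
  induction xs with
  | nil => intro acc h; simpa using h
  | cons x xs ih =>
    intro acc h
    simpa using ih _ (pairwise_insertBy h)

lemma rows_pairwise (xs : List (String × Int × String)) :
    (PySem.List.sorted2 xs (fun t => t.2.2) (fun t => t.1)).Pairwise lexLe := by
  rw [sorted2_eq]
  exact pairwise_foldl_insertBy xs [] (by simp)

lemma beq_owner_eq {t : String × Int × String} {o : String} (h : (t.2.2 == o) = true) :
    t.2.2 = o := by simpa using h

-- filtering one owner's rows out of a lex-sorted insertion commutes with a name-only insertion
lemma filter_insertBy (o : String) (x : String × Int × String)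
    (l : List (String × Int × String)) (hl : l.Pairwise lexLe) :
    (PySem.List.insertBy bLex x l).filter (fun t => t.2.2 == o)
      = if x.2.2 == o then
          PySem.List.insertBy bName x (l.filter (fun t => t.2.2 == o))
        else l.filter (fun t => t.2.2 == o) := by
  induction l with
  | nil =>
    rw [insertBy_nil']
    by_cases hpx : (x.2.2 == o) = true
    · simp [hpx, insertBy_nil']
    · simp [hpx]
  | cons y ys ih =>
    have hys : ys.Pairwise lexLe := hl.of_cons
    rw [insertBy_cons']
    by_cases hb : bLex x y = true
    · rw [if_pos hb]
      by_cases hpx : (x.2.2 == o) = true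
      · by_cases hpy : (y.2.2 == o) = true
        · have hxo := beq_owner_eq hpx
          have hyo := beq_owner_eq hpy
          have hbn : bName x y = true := by
            simp only [bLex, Bool.or_eq_true, Bool.and_eq_true, decide_eq_true_eq] at hb
            rcases hb with hb | ⟨_, hb⟩
            · exact absurd hb (by rw [hxo, hyo]; exact lt_irrefl o)
            · simpa [bName] using hb
          simp [hpx, hpy, insertBy_cons', hbn]
        · -- x belongs to owner o, y to a LATER owner: no o-rows remain in ys
          have hxo := beq_owner_eq hpx
          have hyo : y.2.2 ≠ o := by simpa using hpy
          have hoy : o < y.2.2 :=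
            lt_of_le_of_ne (hxo ▸ lexLe_owner_le (bLex_true hb)) (Ne.symm hyo)
          have hnil : ys.filter (fun t => t.2.2 == o) = [] := by
            refine List.filter_eq_nil_iff.mpr (fun z hz => ?_)
            have : o < z.2.2 :=
              lt_of_lt_of_le hoy (lexLe_owner_le (List.rel_of_pairwise_cons hl hz))
            simpa using (ne_of_gt this)
          simp [hpx, hpy, hnil, insertBy_nil']
      · simp [List.filter_cons, hpx]
    · have hb' : bLex x y = false := by simpa using hb
      rw [if_neg hb]
      by_cases hpx : (x.2.2 == o) = true
      · by_cases hpy : (y.2.2 == o) = true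
        · have hxo := beq_owner_eq hpx
          have hyo := beq_owner_eq hpy
          have hbn : bName x y = false := by
            simp only [bLex, Bool.or_eq_false_iff, Bool.and_eq_false_iff, Bool.not_eq_false',
              decide_eq_true_eq, decide_eq_false_iff_not] at hb'
            obtain ⟨h1, h2⟩ := hb'
            rcases h2 with h2 | h2
            · exact absurd h2 (by rw [hxo, hyo]; exact lt_irrefl o)
            · simpa [bName] using h2
          simp [hpx, hpy, insertBy_cons', hbn, ih hys]
        · simp [hpx, hpy, ih hys]
      · simp [List.filter_cons, hpx, ih hys]

lemma filter_foldl_insertBy (o : String) :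
    ∀ (xs acc : List (String × Int × String)), acc.Pairwise lexLe →
      (xs.foldl (fun a x => PySem.List.insertBy bLex x a) acc).filter (fun t => t.2.2 == o)
        = (xs.filter (fun t => t.2.2 == o)).foldl
            (fun a x => PySem.List.insertBy bName x a)
            (acc.filter (fun t => t.2.2 == o)) := by
  intro xs
  induction xs with
  | nil => intro acc _; simp
  | cons x xs ih =>
    intro acc hacc
    simp only [List.foldl_cons, List.filter_cons]
    rw [ih _ (pairwise_insertBy hacc), filter_insertBy o x acc hacc]
    by_cases hpx : (x.2.2 == o) = true
    · simp [hpx]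
    · simp [hpx]

-- the o-rows of the globally sorted list ARE the o-rows sorted by name
lemma filter_sorted2 (o : String) (xs : List (String × Int × String)) :
    (PySem.List.sorted2 xs (fun t => t.2.2) (fun t => t.1)).filter (fun t => t.2.2 == o)
      = PySem.List.sorted (xs.filter (fun t => t.2.2 == o)) (fun t => t.1) := by
  rw [sorted2_eq, filter_foldl_insertBy o xs [] (by simp), sorted_name_eq]
  simp

-- mapping a projection that preserves the key commutes with the insertion sort
lemma map_insertBy {α β : Type} (f : α → β) (b : α → α → Bool) (b' : β → β → Bool)
    (hb : ∀ a c, b' (f a) (f c) = b a c) (x : α) :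
    ∀ l : List α, (PySem.List.insertBy b x l).map f
      = PySem.List.insertBy b' (f x) (l.map f) := by
  intro l
  induction l with
  | nil => simp [insertBy_nil']
  | cons y ys ih =>
    rw [insertBy_cons', List.map_cons, insertBy_cons', hb]
    by_cases hxy : b x y = true
    · simp [hxy]
    · simp [hxy, ih]

lemma map_foldl_insertBy {α β : Type} (f : α → β) (b : α → α → Bool) (b' : β → β → Bool)
    (hb : ∀ a c, b' (f a) (f c) = b a c) :
    ∀ (l : List α) (acc : List α),
      (l.foldl (fun a x => PySem.List.insertBy b x a) acc).map f
        = (l.map f).foldl (fun a x => PySem.List.insertBy b' x a) (acc.map f) := by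
  intro l
  induction l with
  | nil => intro acc; simp
  | cons x xs ih =>
    intro acc
    simp only [List.foldl_cons, List.map_cons]
    rw [ih, map_insertBy f b b' hb]

lemma sorted_map_pairs (l : List (String × Int × String)) :
    PySem.List.sorted (l.map (fun t => (t.1, t.2.1))) (fun p => p.1)
      = (PySem.List.sorted l (fun t => t.1)).map (fun t => (t.1, t.2.1)) := by
  rw [sorted_name_eq]
  rw [map_foldl_insertBy (fun t => (t.1, t.2.1)) bName
        (fun p q => decide (p.1 < q.1)) (fun _ _ => rfl) l []]
  rfl

-- A's bucket for owner o, in insertion order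
lemma amap_getD (xs : List (String × Int × String)) (o : String) :
    (xs.foldl (fun d t => d.modify t.2.2 [] (fun l => l ++ [(t.1, t.2.1)]))
        (PySem.Dict.empty : PySem.Dict String (List (String × Int)))).getD o []
      = (xs.filter (fun t => t.2.2 == o)).map (fun t => (t.1, t.2.1)) := by
  have h : xs.foldl (fun d t => d.modify t.2.2 [] (fun l => l ++ [(t.1, t.2.1)]))
        (PySem.Dict.empty : PySem.Dict String (List (String × Int)))
      = (xs.map (fun t => (t.2.2, (t.1, t.2.1)))).foldl
          (fun d p => d.modify p.1 [] (fun l => l ++ [p.2])) PySem.Dict.empty := by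
    rw [List.foldl_map]
  rw [h, PySem.Dict.getD_foldl_modify_append, List.filter_map, List.map_map]
  simp only [Function.comp_def]
  simp

lemma amap_keys (xs : List (String × Int × String)) :
    (xs.foldl (fun d t => d.modify t.2.2 [] (fun l => l ++ [(t.1, t.2.1)]))
        (PySem.Dict.empty : PySem.Dict String (List (String × Int)))).keys
      = PySem.Set.ofList (xs.map (fun t => t.2.2)) := by
  rw [PySem.Dict.keys_foldl_modify_key xs (fun t => t.2.2) []
        (fun _ t => fun l => l ++ [(t.1, t.2.1)]) PySem.Dict.empty]
  simp [PySem.Set.update_nil_left]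

lemma ofList_pairwise_lt (l : List String) (h : l.Pairwise (· ≤ ·)) :
    (PySem.Set.ofList l).Pairwise (· < ·) := by
  induction l with
  | nil => simp [PySem.Set.ofList_nil]
  | cons a l ih =>
    rw [PySem.Set.ofList_cons]
    refine List.Pairwise.cons ?_ ?_
    · intro y hy
      obtain ⟨hy1, hy2⟩ := (PySem.Set.mem_discard _ _ _).mp hy
      exact lt_of_le_of_ne (List.rel_of_pairwise_cons h ((PySem.Set.mem_ofList _ _).mp hy1))
        (Ne.symm hy2)
    · exact (ih h.of_cons).sublist List.filter_sublist

lemma owners_sorted_eq (xs : List (String × Int × String)) :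
    PySem.List.sorted (PySem.Set.ofList (xs.map (fun t => t.2.2))) (fun o => o)
      = PySem.List.dedup
          ((PySem.List.sorted2 xs (fun t => t.2.2) (fun t => t.1)).map (fun t => t.2.2)) := by
  set rows := PySem.List.sorted2 xs (fun t => t.2.2) (fun t => t.1) with hrows
  have hperm : (PySem.List.dedup (rows.map (fun t => t.2.2))).Perm
      (PySem.Set.ofList (xs.map (fun t => t.2.2))) := by
    rw [PySem.List.dedup_eq_ofList]
    refine (List.perm_ext_iff_of_nodup (PySem.Set.nodup_ofList _) (PySem.Set.nodup_ofList _)).mpr ?_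
    intro a
    simp only [PySem.Set.mem_ofList, List.mem_map]
    constructor
    · rintro ⟨t, ht, rfl⟩
      exact ⟨t, (PySem.List.sorted2_perm xs _ _ _).mem_iff.mp ht, rfl⟩
    · rintro ⟨t, ht, rfl⟩
      exact ⟨t, (PySem.List.sorted2_perm xs _ _ _).mem_iff.mpr ht, rfl⟩
  have hpw : (PySem.List.dedup (rows.map (fun t => t.2.2))).Pairwise (· < ·) := by
    rw [PySem.List.dedup_eq_ofList]
    refine ofList_pairwise_lt _ ?_
    exact (List.pairwise_map).mpr ((rows_pairwise xs).imp lexLe_owner_le)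
  exact PySem.List.sorted_eq_of_perm_of_pairwise_lt _ _ _ hperm hpw

lemma discard_of_not_mem {α : Type} [BEq α] [LawfulBEq α] {s : PySem.Set α} {o : α}
    (h : o ∉ s) : PySem.Set.discard s o = s := by
  refine List.filter_eq_self.mpr (fun y hy => ?_)
  have : y ≠ o := fun heq => h (heq ▸ hy)
  simpa using this

lemma discard_ofList_group (o : String) (l2 : List String) (h2 : ∀ x ∈ l2, x ≠ o) :
    ∀ l1 : List String, (∀ x ∈ l1, x = o) →
      PySem.Set.discard (PySem.Set.ofList (l1 ++ l2)) o = PySem.Set.ofList l2 := by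
  intro l1
  induction l1 with
  | nil =>
    intro _
    simp only [List.nil_append]
    exact discard_of_not_mem (fun hmem => h2 o ((PySem.Set.mem_ofList _ _).mp hmem) rfl)
  | cons x l1 ih =>
    intro h1
    have hx : x = o := h1 x (List.mem_cons_self ..)
    subst hx
    rw [List.cons_append, PySem.Set.ofList_cons]
    have hstep : PySem.Set.discard (x :: PySem.Set.discard (PySem.Set.ofList (l1 ++ l2)) x) x
        = PySem.Set.discard (PySem.Set.discard (PySem.Set.ofList (l1 ++ l2)) x) x := by
      simp [PySem.Set.discard]
    rw [hstep]
    have hno : x ∉ PySem.Set.discard (PySem.Set.ofList (l1 ++ l2)) x := by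
      intro hmem
      exact ((PySem.Set.mem_discard _ _ _).mp hmem).2 rfl
    rw [discard_of_not_mem hno]
    exact ih (fun y hy => h1 y (List.mem_cons_of_mem _ hy))

lemma dedup_head_group (o : String) (l1 l2 : List String)
    (h1 : ∀ x ∈ l1, x = o) (h2 : ∀ x ∈ l2, x ≠ o) :
    PySem.List.dedup (o :: (l1 ++ l2)) = o :: PySem.List.dedup l2 := by
  simp only [PySem.List.dedup_eq_ofList, PySem.Set.ofList_cons]
  rw [discard_ofList_group o l2 h2 l1 h1]

lemma dropWhile_head_false {α : Type} {p : α → Bool} :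
    ∀ {l : List α} {a : α} {l' : List α}, l.dropWhile p = a :: l' → p a = false := by
  intro l
  induction l with
  | nil => intro a l' h; simp [List.dropWhile] at h
  | cons x xs ih =>
    intro a l' h
    rw [List.dropWhile_cons] at h
    by_cases hx : p x = true
    · rw [if_pos hx] at h; exact ih h
    · rw [if_neg hx] at h
      obtain ⟨rfl, _⟩ := List.cons.injEq .. ▸ h
      · simpa using hx

lemma dropWhile_owner_ne (o : String) (rs : List (String × Int × String))
    (hpw : rs.Pairwise lexLe) (hge : ∀ t ∈ rs, o ≤ t.2.2) :
    ∀ t ∈ rs.dropWhile (fun t => t.2.2 == o), t.2.2 ≠ o := by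
  cases hr : rs.dropWhile (fun t => t.2.2 == o) with
  | nil => intro t ht; simp at ht
  | cons h' t' =>
    have hh'ne : h'.2.2 ≠ o := by simpa using dropWhile_head_false hr
    have hmem0 : h' ∈ rs.dropWhile (fun t => t.2.2 == o) := by
      rw [hr]; exact List.mem_cons_self ..
    have hh'mem : h' ∈ rs := (List.dropWhile_sublist _).subset hmem0
    have hoh' : o < h'.2.2 := lt_of_le_of_ne (hge h' hh'mem) (Ne.symm hh'ne)
    have hpw' : (h' :: t').Pairwise lexLe := by
      rw [← hr]; exact hpw.sublist (List.dropWhile_sublist _)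
    intro t ht
    rcases List.mem_cons.mp ht with rfl | ht
    · exact hh'ne
    · exact ne_of_gt (lt_of_lt_of_le hoh' (lexLe_owner_le (List.rel_of_pairwise_cons hpw' ht)))

lemma bocGo_eq_aux :
    ∀ (n : Nat) (rows : List (String × Int × String)), rows.length ≤ n →
      rows.Pairwise lexLe →
      bocGo rows = (PySem.List.dedup (rows.map (fun t => t.2.2))).map
        (fun o => "_" ++ o ++ ":_ " ++ PySem.Str.join " · "
          ((rows.filter (fun t => t.2.2 == o)).map (fun t => co_link_plain t.1 t.2.1))) := by
  intro n
  induction n with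
  | zero =>
    intro rows hlen _
    have : rows = [] := List.eq_nil_of_length_eq_zero (Nat.le_zero.mp hlen)
    subst this
    simp [bocGo]
  | succ n ih =>
    intro rows hlen hpw
    match rows with
    | [] => simp [bocGo]
    | r :: rs =>
      rw [bocGo]
      set o := r.2.2 with ho
      set run := rs.takeWhile (fun t => t.2.2 == o) with hrun
      set rest := rs.dropWhile (fun t => t.2.2 == o) with hrest
      have hsplit : run ++ rest = rs := List.takeWhile_append_dropWhile
      have hruno : ∀ t ∈ run, t.2.2 = o := by
        intro t ht
        rw [hrun] at ht
        have h' := List.mem_takeWhile_imp ht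
        exact beq_owner_eq h'
      have hRr : ∀ t ∈ rs, lexLe r t := fun t ht => List.rel_of_pairwise_cons hpw ht
      have hrs_pw : rs.Pairwise lexLe := hpw.of_cons
      have hrest_pw : rest.Pairwise lexLe := hrs_pw.sublist (List.dropWhile_sublist _)
      have hrest_ne : ∀ t ∈ rest, t.2.2 ≠ o := by
        rw [hrest]
        exact dropWhile_owner_ne o rs hrs_pw
          (fun t ht => by rw [ho]; exact lexLe_owner_le (hRr t ht))
      have hfilter_run : run.filter (fun t => t.2.2 == o) = run :=
        List.filter_eq_self.mpr (fun t ht => by simpa using hruno t ht)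
      have hfilter_rest : rest.filter (fun t => t.2.2 == o) = [] :=
        List.filter_eq_nil_iff.mpr (fun t ht => by simpa using hrest_ne t ht)
      have hfilter_rows : (r :: rs).filter (fun t => t.2.2 == o) = r :: run := by
        rw [List.filter_cons, if_pos (by simp [ho]), ← hsplit, List.filter_append,
          hfilter_run, hfilter_rest, List.append_nil]
      have hmap : (r :: rs).map (fun t => t.2.2)
          = o :: (run.map (fun t => t.2.2) ++ rest.map (fun t => t.2.2)) := by
        rw [List.map_cons, ← hsplit, List.map_append]
      have hded : PySem.List.dedup ((r :: rs).map (fun t => t.2.2))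
          = o :: PySem.List.dedup (rest.map (fun t => t.2.2)) := by
        rw [hmap]
        exact dedup_head_group o _ _
          (by intro x hx; obtain ⟨t, ht, rfl⟩ := List.mem_map.mp hx; exact hruno t ht)
          (by intro x hx; obtain ⟨t, ht, rfl⟩ := List.mem_map.mp hx; exact hrest_ne t ht)
      rw [hded, List.map_cons]
      have hlen' : rest.length ≤ n := by
        have h1 : rest.length ≤ rs.length := List.length_dropWhile_le _ _
        have h2 : rs.length ≤ n := by simpa using Nat.le_of_succ_le_succ hlen
        exact le_trans h1 h2
      rw [ih rest hlen' hrest_pw]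
      congr 1
      · simp only [hfilter_rows, List.map_cons]
      · refine List.map_congr_left (fun o' ho' => ?_)
        have ho'mem : o' ∈ rest.map (fun t => t.2.2) := by
          rw [PySem.List.dedup_eq_ofList] at ho'
          exact (PySem.Set.mem_ofList _ _).mp ho'
        obtain ⟨t0, ht0, rfl⟩ := List.mem_map.mp ho'mem
        have ho'ne : t0.2.2 ≠ o := hrest_ne t0 ht0
        have : (r :: rs).filter (fun t => t.2.2 == t0.2.2)
            = rest.filter (fun t => t.2.2 == t0.2.2) := by
          rw [List.filter_cons, if_neg (by simpa [ho] using (Ne.symm ho'ne)), ← hsplit,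
            List.filter_append]
          have : run.filter (fun t => t.2.2 == t0.2.2) = [] :=
            List.filter_eq_nil_iff.mpr (fun t ht => by
              simpa [hruno t ht] using Ne.symm ho'ne)
          rw [this, List.nil_append]
        rw [this]

lemma foldl_append_single {α β : Type} (f : α → β) :
    ∀ (l : List α) (acc : List β),
      l.foldl (fun acc x => acc ++ [f x]) acc = acc ++ l.map f := by
  intro l
  induction l with
  | nil => intro acc; simp
  | cons x xs ih => intro acc; simp [ih]

lemma bocGo_eq (rows : List (String × Int × String)) (h : rows.Pairwise lexLe) :
    bocGo rows = (PySem.List.dedup (rows.map (fun t => t.2.2))).map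
      (fun o => "_" ++ o ++ ":_ " ++ PySem.Str.join " · "
        ((rows.filter (fun t => t.2.2 == o)).map (fun t => co_link_plain t.1 t.2.1))) :=
  bocGo_eq_aux rows.length rows le_rfl h

-- ===== VERDICT (by name: the statement is the Claim_ definition above) =====
theorem build_owner_chunks_spec : Claim_equal_build_owner_chunks := by
  unfold Claim_equal_build_owner_chunks
  intro xs _hdom
  unfold Spec_build_owner_chunks
  show build_owner_chunks xs = build_owner_chunks_alt xs
  rw [build_owner_chunks, build_owner_chunks_alt]
  simp only [foldl_append_single, List.nil_append]
  rw [amap_keys]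
  simp only [amap_getD, sorted_map_pairs, ← filter_sorted2, List.map_map]
  rw [owners_sorted_eq]
  rw [bocGo_eq _ (rows_pairwise xs)]
  simp only [Function.comp_def]
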